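-- pv_equiv track=rewrite | github.com/PatilHiteshB/Competetive | Python/ArrayOperations/ArrayOperations.py | arrayOperations
-- ===== SOURCE A (Python) =====
-- from typing import List
--
-- def arrayOperations(n : int, arr : List[int]) -> int:
--     # code here
--     count = 0
--     nonZ = 0
--
--     for i in arr:
--
--         if i == 0:
--
--             if nonZ > 0:
--                 count += 1
--             nonZ = 0
--
--         else:
--             nonZ += 1
--
--
--     if nonZ == n:
--         return -1
--
--     elif nonZ > 0:
--         count += 1
--
--     return count
-- ===== SOURCE B (Python) =====
-- from typing import List
--
-- def arrayOperations(n : int, arr : List[int]) -> int: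
--     # Run-length encode the predicate (x != 0), then read the answer off the runs.
--     runs = []  # list of (is_nonzero, run_length)
--     for x in arr:
--         k = x != 0
--         if runs and runs[-1][0] == k:
--             runs[-1] = (k, runs[-1][1] + 1)
--         else:
--             runs.append((k, 1))
--     blocks = sum(1 for k, _ in runs if k)
--     trail = runs[-1][1] if runs and runs[-1][0] else 0
--     return -1 if trail == n else blocks
-- ===== Notes on version B (the rewrite author's own statement) =====
-- stated objective: alternative
-- what changed: B first run-length encodes the predicate x!=0 into (key, length) runs, then reads the block count and the trailing nonzero-run length off that structure, instead of A's single pass over a (count, nonZ) state machine with a post-loop fixup.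
import Mathlib
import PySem

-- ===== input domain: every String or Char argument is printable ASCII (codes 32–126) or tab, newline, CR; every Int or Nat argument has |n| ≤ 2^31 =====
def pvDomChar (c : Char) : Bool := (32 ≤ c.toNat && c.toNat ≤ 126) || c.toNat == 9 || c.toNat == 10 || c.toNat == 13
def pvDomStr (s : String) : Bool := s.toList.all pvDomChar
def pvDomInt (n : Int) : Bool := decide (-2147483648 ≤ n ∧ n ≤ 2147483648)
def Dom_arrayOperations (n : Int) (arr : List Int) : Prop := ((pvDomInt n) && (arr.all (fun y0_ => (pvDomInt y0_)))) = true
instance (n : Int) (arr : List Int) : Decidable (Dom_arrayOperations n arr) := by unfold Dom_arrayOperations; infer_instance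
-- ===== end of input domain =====

-- B re-reads the answer off a run-length encoding of (x != 0) instead of A's (count, nonZ) state machine; alternative decomposition, same cost.


-- ===== PORT A =====
-- A's loop body: state (count, nonZ)
def pvStepA (s : Int × Int) (i : Int) : Int × Int :=
  if i = 0 then
    (if s.2 > 0 then s.1 + 1 else s.1, 0)
  else
    (s.1, s.2 + 1)

def arrayOperations (n : Int) (arr : List Int) : Int :=
  let s := arr.foldl pvStepA (0, 0)
  if s.2 = n then -1
  else if s.2 > 0 then s.1 + 1
  else s.1

-- ===== PORT B =====
-- B's loop builds the run list by appending / bumping the LAST run; the port keeps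
-- the runs reversed in the accumulator (head = last run) and reverses at the end,
-- the standard transcription of list.append / runs[-1] updates.
def pvStepB (acc : List (Bool × Int)) (x : Int) : List (Bool × Int) :=
  let k : Bool := decide (x ≠ 0)
  match acc with
  | (k', c) :: rest => if k' = k then (k', c + 1) :: rest else (k, 1) :: (k', c) :: rest
  | [] => [(k, 1)]

def arrayOperations_alt (n : Int) (arr : List Int) : Int :=
  let runs := (arr.foldl pvStepB []).reverse
  let blocks : Int := ((runs.filter (·.1)).length : Int)
  let trail : Int :=
    match runs.getLast? with
    | some (true, c) => c
    | _ => 0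
  if trail = n then -1 else blocks

-- ===== PRECONDITION & SPEC =====
def Spec_arrayOperations (n : Int) (arr : List Int) (out : Int) : Prop := out = arrayOperations_alt n arr
instance (n : Int) (arr : List Int) (out : Int) : Decidable (Spec_arrayOperations n arr out) := by unfold Spec_arrayOperations; infer_instance

-- ===== CLAIM (what is proved, stated in full; the proofs are below) =====
def Claim_equal_arrayOperations : Prop := ∀ (n : Int) (arr : List Int), Dom_arrayOperations n arr → Spec_arrayOperations n arr (arrayOperations n arr)

-- ===== LEMMAS AND PROOFS =====

-- trailing nonzero-run length as seen from the reversed accumulator (its head)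
def pvTrail (acc : List (Bool × Int)) : Int :=
  match acc with
  | (true, c) :: _ => c
  | _ => 0

-- whether the reversed accumulator's head is a nonzero run
def pvHeadT (acc : List (Bool × Int)) : Bool :=
  match acc with
  | (true, _) :: _ => true
  | _ => false

-- number of nonzero runs
def pvTCount (l : List (Bool × Int)) : Int := ((l.filter (·.1)).length : Int)

lemma pvInv (arr : List Int) (s : Int × Int) (acc : List (Bool × Int))
    (h1 : pvTrail acc = s.2)
    (h2 : pvTCount acc = s.1 + (if 0 < s.2 then 1 else 0))
    (h3 : (0 < s.2) ↔ pvHeadT acc = true) :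
    pvTrail (arr.foldl pvStepB acc) = (arr.foldl pvStepA s).2 ∧
    pvTCount (arr.foldl pvStepB acc) = (arr.foldl pvStepA s).1 +
      (if 0 < (arr.foldl pvStepA s).2 then 1 else 0) ∧
    ((0 < (arr.foldl pvStepA s).2) ↔ pvHeadT (arr.foldl pvStepB acc) = true) := by
  induction arr generalizing s acc with
  | nil => exact ⟨h1, h2, h3⟩
  | cons x xs ih =>
    simp only [List.foldl_cons]
    apply ih
    all_goals clear ih
    all_goals rcases acc with _ | ⟨⟨b, c⟩, rest⟩
    all_goals try cases b
    all_goals by_cases hx : x = 0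
    all_goals simp_all [pvStepA, pvStepB, pvTrail, pvHeadT, pvTCount]
    all_goals omega

lemma pvGetLast_rev (l : List (Bool × Int)) : l.reverse.getLast? = l.head? := by
  simp

lemma pvFilter_rev (l : List (Bool × Int)) :
    (l.reverse.filter (·.1)).length = (l.filter (·.1)).length := by
  simp

-- ===== VERDICT (by name: the statement is the Claim_ definition above) =====
theorem arrayOperations_spec : Claim_equal_arrayOperations := by
  intro n arr _
  unfold Spec_arrayOperations arrayOperations arrayOperations_alt
  obtain ⟨h1, h2, h3⟩ := pvInv arr (0, 0) []
    (by simp [pvTrail]) (by simp [pvTCount]) (by simp [pvHeadT])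
  set s := arr.foldl pvStepA (0, 0) with hs
  set acc := arr.foldl pvStepB [] with hacc
  clear_value s acc
  clear hs hacc
  simp only [pvGetLast_rev, pvFilter_rev]
  rcases acc with _ | ⟨⟨b, c⟩, rest⟩
  all_goals try cases b
  all_goals simp_all [pvTrail, pvHeadT, pvTCount]
  all_goals split_ifs
  all_goals omega
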